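-- pv_equiv track=rewrite | github.com/Chestnut90/AlgorithmStudy | Problems/Programmers/Level1/doll_grab_game_with_crain.py | solution
-- ===== SOURCE A (Python) =====
-- def clock_wise_90rotation(board):
--     '''
--     board : n by n list.
--     '''
--     x_max = len(board[0])
--     y_max = len(board)
--
--     temp = []
--     for x in range(x_max):
--         row = []
--         for y in range(y_max):
--             row.append(board[y][x])
--         temp.append(row[::-1])
--     return temp
--
-- def solution(board, moves):
--     board = clock_wise_90rotation(board)
--     for row in board:
--         while row:
--             if row[-1] == 0:
--                 row.pop()
--                 continue
--             break
--
--     basket = []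
--     count = 0
--     for move in moves:
--         index = move - 1
--         if board[index]:
--             if basket:
--                 if basket[-1] == board[index][-1]:
--                     basket.pop()
--                     board[index].pop()
--                     count += 2
--                 else:
--                     basket.append(board[index].pop())
--             else:
--                 basket.append(board[index].pop())
--
--     return count
-- ===== SOURCE B (Python) =====
-- def first_nonzero(board, col):
--     r = 0
--     n = len(board)
--     while r < n and board[r][col] == 0:
--         r += 1
--     return r
--
-- def solution(board, moves):
--     n = len(board)
--     ncols = len(board[0])
--     top = []
--     for col in range(ncols):
--         top.append(first_nonzero(board, col))
--     basket = []
--     count = 0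
--     for move in moves:
--         col = move - 1
--         t = top[col]
--         if t < n:
--             v = board[t][col]
--             top[col] = t + 1
--             if basket and basket[-1] == v:
--                 basket.pop()
--                 count += 2
--             else:
--                 basket.append(v)
--     return count
-- ===== Notes on version B (the rewrite author's own statement) =====
-- stated objective: alternative
-- what changed: B never rotates or materialises column stacks: it keeps an index cursor top[col] (topmost non-zero row, found by one downward scan per column) over the original matrix and reads/advances cursors during the moves, instead of A's clockwise rotation plus trailing-zero stripping plus popping from per-column lists.
-- outside the precondition, e.g. on solution([[1, 2], [3, 4, 2]], [0, 0]): A returns 0, B returns 2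
import Mathlib
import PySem

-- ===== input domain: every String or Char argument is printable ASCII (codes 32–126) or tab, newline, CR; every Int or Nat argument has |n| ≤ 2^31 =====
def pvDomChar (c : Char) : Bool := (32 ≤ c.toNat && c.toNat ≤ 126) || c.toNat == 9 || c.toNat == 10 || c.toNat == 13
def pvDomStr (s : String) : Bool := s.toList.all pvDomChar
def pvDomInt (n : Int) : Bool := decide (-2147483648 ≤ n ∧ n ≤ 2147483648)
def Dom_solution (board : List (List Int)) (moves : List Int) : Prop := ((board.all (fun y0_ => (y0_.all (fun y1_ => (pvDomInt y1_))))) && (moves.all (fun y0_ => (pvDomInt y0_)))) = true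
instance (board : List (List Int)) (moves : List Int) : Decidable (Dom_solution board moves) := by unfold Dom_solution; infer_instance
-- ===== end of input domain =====

-- B replaces A's rotate-then-strip column stacks by index cursors over the original matrix (same cost, different structure); A mutates `board` in place in Python — the equivalence proved is about the return value only.

-- ===== PORT A =====
-- while row and row[-1] == 0: row.pop()   (pop from the end = drop from the head of the reverse)
def stripLead : List Int → List Int
  | [] => []
  | a :: t => if a = 0 then stripLead t else a :: t

-- the body of A's `for move in moves` loop (state = (board, basket, count))
def stepA (st : List (List Int) × List Int × Int) (move : Int) : List (List Int) × List Int × Int :=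
  let b := st.1; let basket := st.2.1; let count := st.2.2
  let index := move - 1
  let row := PySem.List.pyGetD b index []
  if row ≠ [] then
    let v := PySem.List.pyGetD row (-1) 0
    let b' := PySem.List.pySetD b index row.dropLast
    if basket ≠ [] then
      if PySem.List.pyGetD basket (-1) 0 = v then (b', basket.dropLast, count + 2)
      else (b', basket ++ [v], count)
    else (b', basket ++ [v], count)
  else st

def solution (board : List (List Int)) (moves : List Int) : Int :=
  let xmax : Int := PySem.List.len (PySem.List.pyGetD board 0 [])
  let ymax : Int := PySem.List.len board
  -- clock_wise_90rotation
  let rot : List (List Int) :=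
    (PySem.List.pyRange 0 xmax 1).foldl
      (fun temp x =>
        temp ++ [((PySem.List.pyRange 0 ymax 1).foldl
          (fun row y => row ++ [PySem.List.pyGetD (PySem.List.pyGetD board y []) x 0]) []).reverse]) []
  -- strip trailing zeros of each row
  let b0 : List (List Int) := rot.map (fun row => (stripLead row.reverse).reverse)
  let final := moves.foldl stepA (b0, ([] : List Int), (0 : Int))
  final.2.2

-- ===== PORT B =====
-- first_nonzero(board, col): downward scan of one column of the original matrix
def firstNonzero : List (List Int) → Int → Int
  | [], _ => 0
  | row :: rest, col => if PySem.List.pyGetD row col 0 = 0 then firstNonzero rest col + 1 else 0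

-- the body of B's `for move in moves` loop (state = (top, basket, count))
def stepB (board : List (List Int)) (n : Int) (st : List Int × List Int × Int) (move : Int) :
    List Int × List Int × Int :=
  let top := st.1; let basket := st.2.1; let count := st.2.2
  let col := move - 1
  let t := PySem.List.pyGetD top col 0
  if t < n then
    let v := PySem.List.pyGetD (PySem.List.pyGetD board t []) col 0
    let top' := PySem.List.pySetD top col (t + 1)
    if basket ≠ [] ∧ PySem.List.pyGetD basket (-1) 0 = v then (top', basket.dropLast, count + 2)
    else (top', basket ++ [v], count)
  else st

def solution_alt (board : List (List Int)) (moves : List Int) : Int :=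
  let n : Int := PySem.List.len board
  let ncols : Int := PySem.List.len (PySem.List.pyGetD board 0 [])
  let top0 : List Int :=
    (PySem.List.pyRange 0 ncols 1).foldl (fun acc col => acc ++ [firstNonzero board col]) []
  let final := moves.foldl (stepB board n) (top0, ([] : List Int), (0 : Int))
  final.2.2

-- ===== PRECONDITION & SPEC =====
-- Pre_ excludes: the empty board and boards with a row shorter than the first (A's rotation raises IndexError),
-- moves whose index move-1 is outside the Python index range of the column count (A raises IndexError), and the
-- one corner where A still returns a value that Pre_ drops: a RAGGED board (some row longer than the first)
-- combined with a non-positive move — there Python's negative indexing makes A read the truncated rotated column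
-- while B reads the right end of each (longer) row; neither value is specified for a board the docstring says is
-- n by n.
def Pre_solution (board : List (List Int)) (moves : List Int) : Prop :=
  board ≠ [] ∧
  (∀ row ∈ board, (board.headD []).length ≤ row.length) ∧
  (∀ m ∈ moves, 1 - ((board.headD []).length : Int) ≤ m ∧ m ≤ ((board.headD []).length : Int)) ∧
  ((∀ row ∈ board, row.length = (board.headD []).length) ∨ (∀ m ∈ moves, 1 ≤ m))
instance (board : List (List Int)) (moves : List Int) : Decidable (Pre_solution board moves) := by
  unfold Pre_solution; infer_instance

def pvWitness_solution : List (List Int) × List Int :=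
  ([[0, 0, 0, 0, 0], [0, 0, 1, 0, 3], [0, 2, 5, 0, 1], [4, 2, 4, 4, 2], [3, 5, 1, 3, 1]],
   [1, 5, 3, 5, 1, 2, 1, 4])

def Spec_solution (board : List (List Int)) (moves : List Int) (out : Int) : Prop := out = solution_alt board moves
instance (board : List (List Int)) (moves : List Int) (out : Int) : Decidable (Spec_solution board moves out) := by unfold Spec_solution; infer_instance

-- ===== CLAIM (what is proved, stated in full; the proofs are below) =====
def Claim_equal_solution : Prop := ∀ (board : List (List Int)) (moves : List Int), Dom_solution board moves → Pre_solution board moves → Spec_solution board moves (solution board moves)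

-- ===== LEMMAS AND PROOFS =====

-- column i of the board, read top to bottom (missing cells read as 0, matching pyGetD's default)
def colVals (board : List (List Int)) (i : Nat) : List Int := board.map (fun row => row.getD i 0)

-- number of leading zeros
def lz : List Int → Nat
  | [] => 0
  | a :: t => if a = 0 then lz t + 1 else 0

lemma lz_le (l : List Int) : lz l ≤ l.length := by
  induction l with
  | nil => simp [lz]
  | cons a t ih => by_cases h : a = 0 <;> simp [lz, h]; omega


lemma stripLead_eq_drop (l : List Int) : stripLead l = l.drop (lz l) := by
  induction l with
  | nil => rfl
  | cons a t ih => by_cases h : a = 0 <;> simp [stripLead, lz, h, ih]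

lemma firstNonzero_natCast (board : List (List Int)) (i : Nat) :
    firstNonzero board (i : Int) = (lz (colVals board i) : Int) := by
  induction board with
  | nil => rfl
  | cons row rest ih =>
      simp only [firstNonzero, colVals, List.map_cons, lz, PySem.List.pyGetD_natCast]
      split <;> simp_all [colVals]

lemma pySetD_neg_natCast' {α : Type} (xs : List α) (k : Nat) (v : α) (h0 : 0 < k)
    (h1 : k ≤ xs.length) : PySem.List.pySetD xs (-(k : Int)) v = xs.set (xs.length - k) v := by
  have h2 : ¬ ((0:Int) ≤ -(k:Int)) := by omega
  have h3 : -((xs.length:Int)) ≤ -(k:Int) := by omega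
  simp only [PySem.List.pySetD, PySem.List.pySet?, PySem.List.pyIdx?, if_neg h2, if_pos h3]
  simp

-- the simulation relation between A's state and B's state
def SimRel (board : List (List Int)) (stA : List (List Int) × List Int × Int)
    (stB : List Int × List Int × Int) : Prop :=
  stA.2.1 = stB.2.1 ∧ stA.2.2 = stB.2.2 ∧
  stA.1.length = (board.headD []).length ∧ stB.1.length = (board.headD []).length ∧
  ∀ i, i < (board.headD []).length →
    ∃ t : Nat, t ≤ board.length ∧ stB.1.getD i 0 = (t : Int) ∧
      stA.1.getD i [] = ((colVals board i).drop t).reverse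

-- index resolution: under Pre_'s per-move conditions both programs address the same column i
lemma resolve_index (board : List (List Int)) (m : Int)
    (hrows : ∀ row ∈ board, (board.headD []).length ≤ row.length)
    (hm1 : 1 - ((board.headD []).length : Int) ≤ m)
    (hm2 : m ≤ ((board.headD []).length : Int))
    (hcase : (∀ row ∈ board, row.length = (board.headD []).length) ∨ 1 ≤ m) :
    ∃ i : Nat, i < (board.headD []).length ∧
      (∀ (α : Type) (xs : List α) (d : α), xs.length = (board.headD []).length →
        PySem.List.pyGetD xs (m - 1) d = xs.getD i d) ∧
      (∀ (α : Type) (xs : List α) (v : α), xs.length = (board.headD []).length →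
        PySem.List.pySetD xs (m - 1) v = xs.set i v) ∧
      (∀ r ∈ board, PySem.List.pyGetD r (m - 1) 0 = r.getD i 0) := by
  by_cases hm : 1 ≤ m
  · refine ⟨(m - 1).toNat, by omega, ?_, ?_, ?_⟩
    · intro α xs d hlen
      rw [PySem.List.pyGetD_eq_getElem xs d (by omega) (by omega)]
      rw [List.getD_eq_getElem xs d (by omega)]
    · intro α xs v hlen
      rw [PySem.List.pySetD_of_nonneg xs v (by omega)]
    · intro r hr
      have := hrows r hr
      rw [PySem.List.pyGetD_eq_getElem r 0 (by omega)
        (by exact_mod_cast (by omega : m - 1 < (r.length : Int)))]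
      rw [List.getD_eq_getElem r 0 (by omega)]
  · have hrect := hcase.resolve_right hm
    have hk0 : 0 < (1 - m).toNat := by omega
    have hkX : (1 - m).toNat ≤ (board.headD []).length := by omega
    have hneg : m - 1 = -((1 - m).toNat : Int) := by omega
    refine ⟨(board.headD []).length - (1 - m).toNat, by omega, ?_, ?_, ?_⟩
    · intro α xs d hlen
      rw [hneg, PySem.List.pyGetD_neg_natCast xs _ d hk0 (by omega)]
      rw [List.getD_eq_getElem xs d (by omega)]
      congr 1
      omega
    · intro α xs v hlen
      rw [hneg, pySetD_neg_natCast' xs _ v hk0 (by omega), hlen]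
    · intro r hr
      have hrl := hrect r hr
      rw [hneg, PySem.List.pyGetD_neg_natCast r _ 0 hk0 (by omega)]
      rw [List.getD_eq_getElem r 0 (by omega)]
      congr 1
      omega

lemma getD_set_ne {α : Type} (l : List α) (i j : Nat) (v : α) (d : α) (hne : j ≠ i) :
    (l.set i v).getD j d = l.getD j d := by
  by_cases hj : j < l.length
  · rw [List.getD_eq_getElem _ d (by simpa using hj), List.getD_eq_getElem _ d hj,
      List.getElem_set_ne (by omega)]
  · rw [List.getD_eq_default _ d (by simpa using hj), List.getD_eq_default _ d (by omega)]

lemma getD_set_self {α : Type} (l : List α) (i : Nat) (v : α) (d : α) (hi : i < l.length) :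
    (l.set i v).getD i d = v := by
  rw [List.getD_eq_getElem _ d (by simpa using hi), List.getElem_set_self]

-- the common state update: column i advances from cursor t to t+1 on both sides
lemma simrel_set (board : List (List Int)) (stA : List (List Int) × List Int × Int)
    (stB : List Int × List Int × Int) (h : SimRel board stA stB) (i : Nat)
    (hiX : i < (board.headD []).length) (t : Nat) (ht : t < board.length)
    (bk : List Int) (c : Int) :
    SimRel board (stA.1.set i (((colVals board i).drop (t + 1)).reverse), bk, c)
      (stB.1.set i ((t : Int) + 1), bk, c) := by
  obtain ⟨-, -, hlenA, hlenB, hinv⟩ := h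
  refine ⟨rfl, rfl, by simpa using hlenA, by simpa using hlenB, ?_⟩
  intro j hj
  by_cases hji : j = i
  · subst hji
    exact ⟨t + 1, by omega, by simpa using getD_set_self stB.1 j _ 0 (by omega),
      by simpa using getD_set_self stA.1 j _ [] (by omega)⟩
  · obtain ⟨u, hun, hu1, hu2⟩ := hinv j hj
    refine ⟨u, hun, ?_, ?_⟩
    · rw [getD_set_ne stB.1 i j _ 0 hji]; exact hu1
    · rw [getD_set_ne stA.1 i j _ [] hji]; exact hu2

lemma step_rel (board : List (List Int)) (m : Int)
    (hrows : ∀ row ∈ board, (board.headD []).length ≤ row.length)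
    (hm1 : 1 - ((board.headD []).length : Int) ≤ m)
    (hm2 : m ≤ ((board.headD []).length : Int))
    (hcase : (∀ row ∈ board, row.length = (board.headD []).length) ∨ 1 ≤ m)
    (stA : List (List Int) × List Int × Int) (stB : List Int × List Int × Int)
    (h : SimRel board stA stB) :
    SimRel board (stepA stA m) (stepB board (board.length : Int) stB m) := by
  obtain ⟨i, hiX, hget, hset, hrowget⟩ := resolve_index board m hrows hm1 hm2 hcase
  obtain ⟨hbk, hc, hlenA, hlenB, hinv⟩ := h
  obtain ⟨t, htn, htop, hb⟩ := hinv i hiX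
  have hcv : (colVals board i).length = board.length := by simp [colVals]
  have e1 : PySem.List.pyGetD stA.1 (m - 1) [] = ((colVals board i).drop t).reverse :=
    (hget _ stA.1 [] hlenA).trans hb
  have e2 : PySem.List.pyGetD stB.1 (m - 1) 0 = (t : Int) :=
    (hget _ stB.1 0 hlenB).trans htop
  simp only [stepA, stepB, e1, e2]
  by_cases ht : t < board.length
  · have hguardA : ((colVals board i).drop t).reverse ≠ [] := by
      simp [List.drop_eq_nil_iff]; omega
    have hguardB : (t : Int) < (board.length : Int) := by exact_mod_cast ht
    rw [if_pos hguardA, if_pos hguardB]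
    have hdrop : (colVals board i).drop t =
        (colVals board i)[t]'(by omega) :: (colVals board i).drop (t + 1) :=
      List.drop_eq_getElem_cons (by omega)
    have hvA : PySem.List.pyGetD (((colVals board i).drop t).reverse) (-1) 0 =
        (colVals board i)[t]'(by omega) := by
      rw [hdrop, List.reverse_cons, PySem.List.pyGetD_neg_one_append_singleton]
    have hdl : (((colVals board i).drop t).reverse).dropLast =
        ((colVals board i).drop (t + 1)).reverse := by
      rw [hdrop, List.reverse_cons, List.dropLast_concat]
    have hvB : PySem.List.pyGetD (PySem.List.pyGetD board (t : Int) []) (m - 1) 0 =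
        (colVals board i)[t]'(by omega) := by
      have hbt : PySem.List.pyGetD board (t : Int) [] = board[t]'ht := by
        rw [PySem.List.pyGetD_natCast, List.getD_eq_getElem _ _ ht]
      rw [hbt, hrowget _ (List.getElem_mem ht)]
      simp [colVals]
    have hsetA : PySem.List.pySetD stA.1 (m - 1) ((((colVals board i).drop t).reverse).dropLast) =
        stA.1.set i (((colVals board i).drop (t + 1)).reverse) := by
      rw [hset _ stA.1 _ hlenA, hdl]
    have hsetB : PySem.List.pySetD stB.1 (m - 1) ((t : Int) + 1) =
        stB.1.set i ((t : Int) + 1) := hset _ stB.1 _ hlenB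
    rw [hvA, hvB, hsetA, hsetB, hbk]
    have hupd := simrel_set board stA stB ⟨hbk, hc, hlenA, hlenB, hinv⟩ i hiX t ht
    by_cases h1 : stB.2.1 ≠ []
    · rw [if_pos h1]
      by_cases h2 : PySem.List.pyGetD stB.2.1 (-1) 0 = (colVals board i)[t]'(by omega)
      · rw [if_pos h2, if_pos ⟨h1, h2⟩, hc]
        exact hupd _ _
      · rw [if_neg h2, if_neg (by tauto), hc]
        exact hupd _ _
    · rw [if_neg h1, if_neg (by tauto), hc]
      exact hupd _ _
  · have ht' : t = board.length := by omega
    have hguardA : ¬ (((colVals board i).drop t).reverse ≠ []) := by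
      simp [List.drop_eq_nil_iff]; omega
    have hguardB : ¬ ((t : Int) < (board.length : Int)) := by exact_mod_cast ht
    rw [if_neg hguardA, if_neg hguardB]
    exact ⟨hbk, hc, hlenA, hlenB, hinv⟩

lemma fold_rel (board : List (List Int)) (moves : List Int)
    (hrows : ∀ row ∈ board, (board.headD []).length ≤ row.length)
    (hmv : ∀ m ∈ moves, 1 - ((board.headD []).length : Int) ≤ m ∧ m ≤ ((board.headD []).length : Int))
    (hcase : (∀ row ∈ board, row.length = (board.headD []).length) ∨ (∀ m ∈ moves, 1 ≤ m))
    (stA : List (List Int) × List Int × Int) (stB : List Int × List Int × Int)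
    (h : SimRel board stA stB) :
    SimRel board (moves.foldl stepA stA) (moves.foldl (stepB board (board.length : Int)) stB) := by
  induction moves generalizing stA stB with
  | nil => exact h
  | cons m rest ih =>
      have hm := hmv m (by simp)
      refine ih (fun x hx => hmv x (by simp [hx]))
        (hcase.imp id (fun hp x hx => hp x (by simp [hx]))) _ _ ?_
      exact step_rel board m hrows hm.1 hm.2
        (hcase.imp id (fun hp => hp m (by simp))) stA stB h

lemma init_rel (board : List (List Int)) :
    SimRel board
      (((PySem.List.pyRange 0 (PySem.List.len (PySem.List.pyGetD board 0 [])) 1).foldl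
          (fun temp x =>
            temp ++ [((PySem.List.pyRange 0 (PySem.List.len board) 1).foldl
              (fun row y => row ++ [PySem.List.pyGetD (PySem.List.pyGetD board y []) x 0]) []).reverse]) []).map
        (fun row => (stripLead row.reverse).reverse), ([] : List Int), (0 : Int))
      ((PySem.List.pyRange 0 (PySem.List.len (PySem.List.pyGetD board 0 [])) 1).foldl
          (fun acc col => acc ++ [firstNonzero board col]) [], ([] : List Int), (0 : Int)) := by
  have hX : PySem.List.pyGetD board 0 [] = board.headD [] := by
    cases board <;> simp [PySem.List.pyGetD_zero]
  have hinner : ∀ x : Int,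
      (PySem.List.pyRange 0 (PySem.List.len board) 1).foldl
        (fun row y => row ++ [PySem.List.pyGetD (PySem.List.pyGetD board y []) x 0]) [] =
      board.map (fun r => PySem.List.pyGetD r x 0) := by
    intro x
    rw [PySem.List.len_eq,
      PySem.List.foldl_pyRange_zero_pyGetD' board ([] : List Int)
        (fun acc r => acc ++ [PySem.List.pyGetD r x 0]) [],
      PySem.List.foldl_append_singleton_eq_map]
    simp
  have houter : ∀ {β : Type} (g : Int → β),
      (PySem.List.pyRange 0 (PySem.List.len (PySem.List.pyGetD board 0 [])) 1).foldl
        (fun acc x => acc ++ [g x]) [] =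
      (List.range (board.headD []).length).map (fun (k : Nat) => g (k : Int)) := by
    intro β g
    rw [PySem.List.foldl_append_singleton_eq_map, PySem.List.len_eq, hX,
      PySem.List.pyRange_zero_nat, List.map_map]
    rfl
  have hA : ((PySem.List.pyRange 0 (PySem.List.len (PySem.List.pyGetD board 0 [])) 1).foldl
        (fun temp x =>
          temp ++ [((PySem.List.pyRange 0 (PySem.List.len board) 1).foldl
            (fun row y => row ++ [PySem.List.pyGetD (PySem.List.pyGetD board y []) x 0]) []).reverse]) []).map
        (fun row => (stripLead row.reverse).reverse) =
      (List.range (board.headD []).length).map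
        (fun (k : Nat) => ((colVals board k).drop (lz (colVals board k))).reverse) := by
    rw [houter, List.map_map]
    refine List.map_congr_left ?_
    intro k _
    simp only [Function.comp]
    rw [hinner, List.reverse_reverse]
    have hcol : board.map (fun r => PySem.List.pyGetD r (k : Int) 0) = colVals board k := by
      simp [colVals]
    rw [hcol, stripLead_eq_drop]
  have hB : (PySem.List.pyRange 0 (PySem.List.len (PySem.List.pyGetD board 0 [])) 1).foldl
        (fun acc col => acc ++ [firstNonzero board col]) [] =
      (List.range (board.headD []).length).map
        (fun (k : Nat) => (lz (colVals board k) : Int)) := by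
    rw [houter]
    exact List.map_congr_left (fun k _ => firstNonzero_natCast board k)
  refine ⟨rfl, rfl, ?_, ?_, ?_⟩
  · rw [hA]; simp
  · rw [hB]; simp
  · intro i hi
    refine ⟨lz (colVals board i), ?_, ?_, ?_⟩
    · have := lz_le (colVals board i); simpa [colVals] using this
    · rw [hB, List.getD_eq_getElem _ _ (by simpa using hi)]
      simp
    · rw [hA, List.getD_eq_getElem _ _ (by simpa using hi)]
      simp

-- ===== VERDICT (by name: the statement is the Claim_ definition above) =====
theorem solution_spec : Claim_equal_solution := by
  intro board moves _ hpre
  obtain ⟨hne, hrows, hmv, hcase⟩ := hpre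
  unfold Spec_solution solution solution_alt
  have h := fold_rel board moves hrows hmv hcase _ _ (init_rel board)
  exact h.2.1
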